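-- pv_equiv track=rewrite | github.com/davidszkl/miscellaneous | Taxman/taxes.py | my_is_decimal
-- ===== SOURCE A (Python) =====
-- def my_is_decimal(string):
-- 	dot_count = 0
-- 	for i in string:
-- 		if i == '.':
-- 			dot_count += 1
-- 		if not ('0' <= i <= '9' or i == '.') or dot_count > 1:
-- 			return False
-- 	return True
-- ===== SOURCE B (Python) =====
-- def my_is_decimal(string):
--     head, _dot, tail = string.partition('.')
--     return all('0' <= c <= '9' for c in head) and all('0' <= c <= '9' for c in tail)
-- ===== Notes on version B (the rewrite author's own statement) =====
-- stated objective: idiomatic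
-- what changed: Replaces the char-by-char loop with a mutable dot counter by a single str.partition split at the first dot plus two all()-digit checks; a second dot lands in the tail and fails the digit check.
import Mathlib
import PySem

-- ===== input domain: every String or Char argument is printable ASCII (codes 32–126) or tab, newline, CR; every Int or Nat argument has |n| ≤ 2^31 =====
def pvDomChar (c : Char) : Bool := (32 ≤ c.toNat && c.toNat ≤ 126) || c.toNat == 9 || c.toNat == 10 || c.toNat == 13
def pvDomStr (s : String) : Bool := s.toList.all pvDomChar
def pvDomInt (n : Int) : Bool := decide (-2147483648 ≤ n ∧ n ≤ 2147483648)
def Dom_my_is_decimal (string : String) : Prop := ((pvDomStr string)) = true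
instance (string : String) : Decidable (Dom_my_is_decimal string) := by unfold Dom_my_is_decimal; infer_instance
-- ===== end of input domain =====

-- B replaces A's char loop with a dot counter by one partition('.') split and two all-digits checks (idiomatic; same cost).

-- ===== PORT A =====
-- A's for-loop over the characters, carrying dot_count; early `return False` = returning false.
def myIsDecimalLoop : List Char → Nat → Bool
  | [], _ => true
  | c :: rest, dotCount =>
    let dotCount' := if c = '.' then dotCount + 1 else dotCount
    if (¬ (('0' ≤ c ∧ c ≤ '9') ∨ c = '.')) ∨ dotCount' > 1 then false
    else myIsDecimalLoop rest dotCount'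

def my_is_decimal (string : String) : Bool := myIsDecimalLoop string.toList 0

-- ===== PORT B =====
-- '0' <= c <= '9' from Source B's generator expressions
def myIsDigit (c : Char) : Bool := decide ('0' ≤ c ∧ c ≤ '9')

-- string.partition('.'): span at the first '.'; tail is what follows it (empty if no '.').
def my_is_decimal_alt (string : String) : Bool :=
  let p := string.toList.span (fun c => c ≠ '.')
  p.1.all myIsDigit && p.2.tail.all myIsDigit

-- ===== PRECONDITION & SPEC =====
def Spec_my_is_decimal (string : String) (out : Bool) : Prop := out = my_is_decimal_alt string
instance (string : String) (out : Bool) : Decidable (Spec_my_is_decimal string out) := by unfold Spec_my_is_decimal; infer_instance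

-- ===== CLAIM (what is proved, stated in full; the proofs are below) =====
def Claim_equal_my_is_decimal : Prop := ∀ (string : String), Dom_my_is_decimal string → Spec_my_is_decimal string (my_is_decimal string)

-- ===== LEMMAS AND PROOFS =====

-- digit-or-dot, the character class A admits
def pdot (c : Char) : Bool := myIsDigit c || c = '.'

theorem loopA_char (l : List Char) : ∀ dc : Nat, dc ≤ 1 →
    myIsDecimalLoop l dc = (l.all pdot && decide (dc + l.count '.' ≤ 1)) := by
  induction l with
  | nil => intro dc h; simp [myIsDecimalLoop]; omega
  | cons c rest ih =>
    intro dc h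
    by_cases hdot : c = '.'
    · subst hdot
      by_cases hbig : dc = 0
      · subst hbig
        simp only [myIsDecimalLoop]
        simp only [if_true]
        rw [if_neg (by decide)]
        simp only [Nat.zero_add]
        rw [ih 1 (by omega)]
        simp only [List.all_cons, List.count_cons]
        have hp : pdot '.' = true := by decide
        have hc : (decide (1 + List.count '.' rest ≤ 1))
            = (decide (List.count '.' rest + 1 ≤ 1)) := decide_eq_decide.mpr (by omega)
        rw [hp, hc]
        simp
      · have h1 : dc = 1 := by omega
        subst h1
        simp only [myIsDecimalLoop]
        simp only [if_true]
        rw [if_pos (Or.inr (by omega))]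
        simp only [List.count_cons]
        have : ¬ (1 + (List.count '.' rest + 1) ≤ 1) := by omega
        simp [this]
    · by_cases hd : ('0' ≤ c ∧ c ≤ '9')
      · simp only [myIsDecimalLoop]
        rw [if_neg hdot, if_neg (by simp [hd, hdot]; omega)]
        rw [ih dc h]
        simp [pdot, myIsDigit, hd, hdot, List.count_cons]
      · simp only [myIsDecimalLoop]
        rw [if_neg hdot, if_pos (Or.inl (by tauto))]
        simp [pdot, myIsDigit, hd, hdot]

theorem all_dig_char (l : List Char) :
    l.all myIsDigit = (l.all pdot && decide (l.count '.' = 0)) := by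
  induction l with
  | nil => simp
  | cons c rest ih =>
    by_cases hdot : c = '.'
    · subst hdot
      simp [pdot, myIsDigit]
    · simp [pdot, hdot, ih]
      rw [Bool.and_assoc]
theorem altB_char (l : List Char) :
    ((l.span (fun c => c ≠ '.')).1.all myIsDigit && (l.span (fun c => c ≠ '.')).2.tail.all myIsDigit)
      = (l.all pdot && decide (l.count '.' ≤ 1)) := by
  induction l with
  | nil => simp
  | cons c rest ih =>
    rw [List.span_eq_takeWhile_dropWhile] at ih ⊢
    by_cases hdot : c = '.'
    · subst hdot
      simp [all_dig_char, pdot]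
    · simp only [List.takeWhile_cons, List.dropWhile_cons, ne_eq, decide_not] at ih ⊢
      rw [if_pos (by simp [hdot]), if_pos (by simp [hdot])]
      simp only [List.all_cons, Bool.and_assoc, List.count_cons]
      rw [ih]
      have hbe : (c == '.') = false := by simp [hdot]
      simp [pdot, hbe, hdot]

-- ===== VERDICT (by name: the statement is the Claim_ definition above) =====
theorem my_is_decimal_spec : Claim_equal_my_is_decimal := by
  intro s _
  unfold Spec_my_is_decimal my_is_decimal my_is_decimal_alt
  rw [loopA_char s.toList 0 (by omega)]
  simp only [Nat.zero_add]
  exact (altB_char s.toList).symm
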